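-- pv_equiv track=rewrite | github.com/testes-app/loto-facil-app | scripts/calculo_probabilidades.py | posicao_combinacao
-- ===== SOURCE A (Python) =====
-- from math import comb
--
-- def posicao_combinacao(combo):
--     """
--     Calcula a posição de uma combinação sem varrer todas as outras.
--     Usa o sistema de numeração combinatória (combinatorial number system).
--     """
--     n = 25  # números de 1 a 25
--     k = 15  # escolher 15
--
--     combo = sorted(combo)
--     posicao = 0
--
--     for i, num in enumerate(combo):
--         # Quantas combinações existem antes desta escolha
--         inicio = (combo[i-1] if i > 0 else 0)
--         for v in range(inicio + 1, num):
--             posicao += comb(n - v, k - i - 1)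
--
--     return posicao + 1  # +1 porque começa em 1
-- ===== SOURCE B (Python) =====
-- from math import comb
--
-- def posicao_combinacao(combo):
--     """
--     Posicao no sistema de numeracao combinatoria (n=25, k=15), sem o laco
--     interno: cada passo com salto usa a forma fechada (hockey-stick) da
--     soma de A; passos consecutivos ou duplicados contribuem 0.
--     """
--     posicao = 0
--     inicio = 0
--     for i, num in enumerate(sorted(combo)):
--         if num > inicio + 1:
--             posicao += comb(25 - inicio, 15 - i) - comb(26 - num, 15 - i)
--         inicio = num
--     return posicao + 1
-- ===== Notes on version B (the rewrite author's own statement) =====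
-- stated objective: simpler
-- what changed: B removes A's inner summation loop entirely: each sorted element with a gap above its predecessor contributes the hockey-stick closed form comb(25-inicio,15-i)-comb(26-num,15-i), with the previous element carried in an accumulator instead of re-indexed via combo[i-1]; gap-free steps contribute 0 without calling comb, exactly as A's empty inner range does.
import Mathlib
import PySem

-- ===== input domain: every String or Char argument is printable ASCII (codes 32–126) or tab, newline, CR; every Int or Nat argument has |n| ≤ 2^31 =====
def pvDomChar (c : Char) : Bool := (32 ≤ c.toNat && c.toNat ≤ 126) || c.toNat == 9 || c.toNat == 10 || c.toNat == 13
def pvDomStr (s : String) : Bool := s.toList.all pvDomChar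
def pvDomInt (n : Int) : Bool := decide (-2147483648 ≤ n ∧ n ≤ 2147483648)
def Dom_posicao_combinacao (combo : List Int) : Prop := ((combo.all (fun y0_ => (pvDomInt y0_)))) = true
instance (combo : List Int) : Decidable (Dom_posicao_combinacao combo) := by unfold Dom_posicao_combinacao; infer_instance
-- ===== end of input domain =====

-- B replaces A's inner summation loop by the hockey-stick closed form: one guarded comb step
-- per sorted element, no inner loop; objective: simpler.

-- math.comb; exact for nonnegative arguments, and Pre_ guarantees every call both ports make
-- has nonnegative arguments.
def pyComb (n k : Int) : Int := (Nat.choose n.toNat k.toNat : Int)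

-- ===== PORT A =====
def posicao_combinacao (combo : List Int) : Int :=
  let s := PySem.List.sorted combo (fun x => x) false
  let posicao : Int :=
    (PySem.List.enumerate s 0).foldl
      (fun posicao p =>
        -- inicio = combo[i-1] if i > 0 else 0  (index i-1 is always in range when i > 0)
        let inicio : Int := if p.1 > 0 then PySem.List.pyGetD s (p.1 - 1) 0 else 0
        (PySem.List.pyRange (inicio + 1) p.2 1).foldl
          (fun q v => q + pyComb (25 - v) (15 - p.1 - 1)) posicao)
      0
  posicao + 1

-- ===== PORT B =====
def posicao_combinacao_alt (combo : List Int) : Int :=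
  let st :=
    (PySem.List.enumerate (PySem.List.sorted combo (fun x => x) false) 0).foldl
      (fun (st : Int × Int) p =>
        (if p.2 > st.2 + 1 then
           st.1 + pyComb (25 - st.2) (15 - p.1) - pyComb (26 - p.2) (15 - p.1)
         else st.1,
         p.2))
      (0, 0)
  st.1 + 1

-- ===== PRECONDITION & SPEC =====
-- Pre_ is exactly the set of inputs on which the Python A returns normally: a step of the
-- sorted list may jump (leave a gap above its predecessor, with 0 before the first element)
-- only at position i ≤ 14 and to a value ≤ 26; any other jump makes A call
-- math.comb with a negative argument, which raises ValueError.
def pvOkStep (i : Nat) (p x : Int) : Bool :=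
  decide (x ≤ p + 1) || (decide (p + 2 ≤ x) && decide (i ≤ 14) && decide (x ≤ 26))
def pvPreChain : List Int → Nat → Int → Bool
  | [], _, _ => true
  | x :: t, i, p => pvOkStep i p x && pvPreChain t (i + 1) x
def Pre_posicao_combinacao (combo : List Int) : Prop :=
  pvPreChain (PySem.List.sorted combo (fun x => x) false) 0 0 = true
instance (combo : List Int) : Decidable (Pre_posicao_combinacao combo) := by
  unfold Pre_posicao_combinacao; infer_instance

def pvWitness_posicao_combinacao : List Int := [2, 1, 5, 4, 25]

def Spec_posicao_combinacao (combo : List Int) (out : Int) : Prop := out = posicao_combinacao_alt combo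
instance (combo : List Int) (out : Int) : Decidable (Spec_posicao_combinacao combo out) := by unfold Spec_posicao_combinacao; infer_instance

-- ===== CLAIM (what is proved, stated in full; the proofs are below) =====
def Claim_equal_posicao_combinacao : Prop := ∀ (combo : List Int), Dom_posicao_combinacao combo → Pre_posicao_combinacao combo → Spec_posicao_combinacao combo (posicao_combinacao combo)

-- ===== LEMMAS AND PROOFS =====

-- Hockey-stick: A's inner sum over range(a+1, a+1+k) equals B's closed-form term.
theorem pv_hockey (k : Nat) : ∀ (a c r : Int), 0 ≤ r → a + 1 + k ≤ 26 →
    (PySem.List.pyRange (a + 1) (a + 1 + k) 1).foldl (fun q v => q + pyComb (25 - v) r) c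
      = c + pyComb (25 - a) (r + 1) - pyComb (25 - a - k) (r + 1) := by
  induction k with
  | zero =>
      intro a c r _ _
      rw [show a + 1 + ((0:Nat):Int) = a + 1 by simp,
          PySem.List.pyRange_one_eq_nil (by omega)]
      simp
  | succ k ih =>
      intro a c r hr hb
      rw [show a + 1 + ((k+1 : Nat) : Int) = a + 1 + 1 + k by push_cast; ring] at *
      rw [PySem.List.pyRange_one_cons (by omega)]
      simp only [List.foldl_cons]
      rw [show a + 1 + 1 + (k:Int) = (a+1) + 1 + k by ring,
          ih (a+1) (c + pyComb (25 - (a+1)) r) r hr (by omega)]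
      -- Pascal: C(25-a, r+1) = C(24-a, r) + C(24-a, r+1)
      have hpas : pyComb (25 - a) (r + 1) = pyComb (24 - a) r + pyComb (24 - a) (r + 1) := by
        unfold pyComb
        have h1 : (25 - a).toNat = (24 - a).toNat + 1 := by omega
        have h2 : (r + 1).toNat = r.toNat + 1 := by omega
        rw [h1, h2, Nat.choose_succ_succ]
        push_cast; ring
      have e1 : (25 : Int) - (a + 1) = 24 - a := by ring
      have e2 : (25 : Int) - (a + 1) - k = 25 - a - (k + 1) := by ring
      rw [e1, e2] at *
      rw [hpas]; push_cast; ring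

-- Main loop invariant: A's fold over the suffix full.drop j equals B's fold over it.
theorem pv_loop (t : List Int) : ∀ (full : List Int) (j : Nat) (prev pA : Int),
    full.drop j = t →
    (if (j : Int) > 0 then PySem.List.pyGetD full ((j : Int) - 1) 0 else 0) = prev →
    pvPreChain t j prev = true →
    (PySem.List.enumerate t (j : Int)).foldl
        (fun posicao p =>
          let inicio : Int := if p.1 > 0 then PySem.List.pyGetD full (p.1 - 1) 0 else 0
          (PySem.List.pyRange (inicio + 1) p.2 1).foldl
            (fun q v => q + pyComb (25 - v) (15 - p.1 - 1)) posicao)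
        pA
      = ((PySem.List.enumerate t (j : Int)).foldl
          (fun (st : Int × Int) p =>
            (if p.2 > st.2 + 1 then
               st.1 + pyComb (25 - st.2) (15 - p.1) - pyComb (26 - p.2) (15 - p.1)
             else st.1,
             p.2))
          (pA, prev)).1 := by
  induction t with
  | nil => intro full j prev pA _ _ _; simp [PySem.List.enumerate_nil]
  | cons num t ih =>
      intro full j prev pA hdrop hprev hpre
      simp only [pvPreChain, Bool.and_eq_true] at hpre
      obtain ⟨hok, hpre'⟩ := hpre
      have hj : j < full.length := by
        by_contra h
        rw [List.drop_eq_nil_of_le (by omega)] at hdrop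
        exact List.cons_ne_nil _ _ hdrop.symm
      have hfullj : PySem.List.pyGetD full (j : Int) 0 = num := by
        have h0 : (full.drop j)[0]'(by rw [hdrop]; simp) = num := by simp [hdrop]
        rw [List.getElem_drop] at h0
        rw [PySem.List.pyGetD_natCast, List.getD_eq_getElem _ _ hj]
        simpa using h0
      rw [PySem.List.enumerate_cons]
      simp only [List.foldl_cons]
      -- A's inner loop at index j equals B's guarded closed-form step
      have hstep :
          (PySem.List.pyRange (prev + 1) num 1).foldl
              (fun q v => q + pyComb (25 - v) (15 - (j : Int) - 1)) pA
            = (if num > prev + 1 then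
                 pA + pyComb (25 - prev) (15 - (j : Int)) - pyComb (26 - num) (15 - (j : Int))
               else pA) := by
        by_cases h2 : prev + 2 ≤ num
        · have hb : (j ≤ 14 ∧ num ≤ 26) := by
            simp only [pvOkStep, Bool.or_eq_true, Bool.and_eq_true, decide_eq_true_eq] at hok
            rcases hok with h | h <;> omega
          have hh := pv_hockey ((num - prev - 1).toNat) prev pA (15 - (j : Int) - 1)
            (by omega) (by omega)
          rw [show prev + 1 + (((num - prev - 1).toNat : Int)) = num by omega] at hh
          rw [hh, if_pos (by omega),
              show (15 : Int) - (j : Int) - 1 + 1 = 15 - (j : Int) by ring,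
              show (25 : Int) - prev - (((num - prev - 1).toNat : Int)) = 26 - num by omega]
        · rw [PySem.List.pyRange_one_eq_nil (by omega), if_neg (by omega)]
          simp
      have hdrop' : full.drop (j + 1) = t := by
        have h1 := congrArg (List.drop 1) hdrop
        simpa [List.drop_drop, Nat.add_comm] using h1
      rw [hprev, hstep, show ((j : Int) + 1) = ((j + 1 : Nat) : Int) by push_cast; ring]
      exact ih full (j + 1) num _
        hdrop'
        (by rw [if_pos (by push_cast; omega)]
            rw [show ((j + 1 : Nat) : Int) - 1 = (j : Int) by push_cast; ring, hfullj])
        hpre'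

-- ===== VERDICT (by name: the statement is the Claim_ definition above) =====
theorem posicao_combinacao_spec : Claim_equal_posicao_combinacao := by
  intro combo _ hpre
  unfold Spec_posicao_combinacao posicao_combinacao posicao_combinacao_alt
  set s := PySem.List.sorted combo (fun x => x) false with hs
  unfold Pre_posicao_combinacao at hpre
  rw [← hs] at hpre
  have := pv_loop s s 0 0 0 (by simp) (by simp) hpre
  simp only [Nat.cast_zero] at this
  simp [this]
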